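-- pv_equiv track=rewrite | github.com/kylinlyy/hanlptensorflow | pre_data.py | content_str_2_list
-- ===== SOURCE A (Python) =====
-- def filter_empty(f_list):
--     while " " in f_list:
--         f_list.remove(" ")
--     while "" in f_list:
--         f_list.remove("")
--
-- def content_str_2_list(pag_cat_dict):
--     #将目录字典，转化为{长度：[[1],[2]],长度:[[1,1],[1,2]]
--     cat_list = list(pag_cat_dict.keys())
--     cat_ana_dict = {}  # 例如{1: [['1'], ['2'], ['3']], 2: [['1', '1'], ['1', '2'], ['1', '3'], ['2', '1'], ['2', '2'], ['2', '3']], 3: [['2', '2', '1'], ['2', '2', '2'], ['2', '3', '1'], ['2', '3', '2'], ['2', '3', '3']]}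
--     for cl in cat_list:
--         cl_list = cl.split(".")
--         filter_empty(cl_list)
--         cllen = len(cl_list)
--         if cllen in cat_ana_dict.keys():
--             cat_ana_dict[cllen].append(cl_list)
--         else:
--             cat_ana_dict[cllen] = [cl_list]
--     return cat_ana_dict
-- ===== SOURCE B (Python) =====
-- def content_str_2_list(pag_cat_dict):
--     # grouped-pass rewrite: precompute filtered segment lists, then build each
--     # length bucket by one gather per distinct length (first-occurrence order)
--     segs = [[p for p in k.split(".") if p not in ("", " ")] for k in pag_cat_dict]
--     lens = dict.fromkeys(len(s) for s in segs)
--     return {n: [s for s in segs if len(s) == n] for n in lens}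
-- ===== Notes on version B (the rewrite author's own statement) =====
-- stated objective: simpler
-- what changed: Replaces the single scan that scatters each split key into a mutable dict bucket (with a contains-check/append-or-create branch) by a grouped decomposition: precompute all filtered segment lists once, dedup their lengths in first-occurrence order, then gather each length's bucket with one comprehension per distinct length.
import Mathlib
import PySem

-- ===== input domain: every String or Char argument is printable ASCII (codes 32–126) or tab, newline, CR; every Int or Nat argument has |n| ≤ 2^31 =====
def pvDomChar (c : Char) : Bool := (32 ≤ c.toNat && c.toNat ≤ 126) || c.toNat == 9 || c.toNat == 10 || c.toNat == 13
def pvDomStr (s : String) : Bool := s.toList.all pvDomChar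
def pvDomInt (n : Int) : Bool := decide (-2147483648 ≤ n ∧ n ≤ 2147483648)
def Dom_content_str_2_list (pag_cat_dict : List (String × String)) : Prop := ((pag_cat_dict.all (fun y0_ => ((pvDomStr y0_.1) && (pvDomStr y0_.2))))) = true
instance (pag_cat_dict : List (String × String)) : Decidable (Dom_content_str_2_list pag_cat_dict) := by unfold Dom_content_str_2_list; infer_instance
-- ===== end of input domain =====

-- B replaces A's scatter-into-dict-buckets scan by a grouped decomposition (segment lists
-- once, dedup the lengths, one gather per distinct length); objective: simpler, same results.

-- ===== PORT A =====
-- filter_empty: the two `while … in …: f_list.remove(…)` loops, removing first occurrences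
-- until none is left (l.remove(x) = PySem.List.remove?; the loop runs only while x ∈ l).
def pvRemoveAll (x : String) (l : List String) : List String :=
  if h : x ∈ l then pvRemoveAll x ((PySem.List.remove? l x).getD l) else l
termination_by l.length
decreasing_by
  rw [PySem.List.remove?_eq_some_erase _ _ h, Option.getD_some]
  have h1 := List.length_erase_of_mem h
  have h2 : 0 < l.length := List.length_pos_of_mem h
  omega

def pvFilterEmpty (l : List String) : List String := pvRemoveAll "" (pvRemoveAll " " l)

-- cl.split(".") : the separator is the nonempty literal ".", so Python never raises; split? is some here.
def content_str_2_list (pag_cat_dict : List (String × String)) : List (Int × List (List String)) :=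
  let cat_list := (PySem.Dict.ofList pag_cat_dict).keys
  (cat_list.foldl (fun d cl =>
      let cl_list := pvFilterEmpty ((PySem.Str.split? cl ".").getD [])
      let cllen : Int := (cl_list.length : Int)
      if d.contains cllen then d.modify cllen [] (· ++ [cl_list])
      else d.insert cllen [cl_list]) PySem.Dict.empty).items

-- ===== PORT B =====
def pvSegments (k : String) : List String :=
  ((PySem.Str.split? k ".").getD []).filter (fun p => !(p == "" || p == " "))

def content_str_2_list_alt (pag_cat_dict : List (String × String)) : List (Int × List (List String)) :=
  let segs := ((PySem.Dict.ofList pag_cat_dict).keys).map pvSegments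
  let lens := PySem.List.dedup (segs.map (fun s => (s.length : Int)))
  lens.map (fun n => (n, segs.filter (fun s => ((s.length : Int) == n))))

-- ===== PRECONDITION & SPEC =====
def Spec_content_str_2_list (pag_cat_dict : List (String × String)) (out : List (Int × List (List String))) : Prop := out = content_str_2_list_alt pag_cat_dict
instance (pag_cat_dict : List (String × String)) (out : List (Int × List (List String))) : Decidable (Spec_content_str_2_list pag_cat_dict out) := by unfold Spec_content_str_2_list; infer_instance

-- ===== CLAIM (what is proved, stated in full; the proofs are below) =====
def Claim_equal_content_str_2_list : Prop := ∀ (pag_cat_dict : List (String × String)), Dom_content_str_2_list pag_cat_dict → Spec_content_str_2_list pag_cat_dict (content_str_2_list pag_cat_dict)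

-- ===== LEMMAS AND PROOFS =====

-- erasing one occurrence of x does not change the sublist of non-x elements
theorem pv_filter_erase_self (x : String) (l : List String) :
    (l.erase x).filter (fun a => !(a == x)) = l.filter (fun a => !(a == x)) := by
  induction l with
  | nil => rfl
  | cons a t ih =>
    by_cases hax : a = x
    · subst hax; simp
    · simp [hax, ih]

-- A's remove-until-absent loop computes a filter
theorem pvRemoveAll_eq (x : String) (l : List String) :
    pvRemoveAll x l = l.filter (fun a => !(a == x)) := by
  rw [pvRemoveAll.eq_def]
  by_cases h : x ∈ l
  · rw [dif_pos h, PySem.List.remove?_eq_some_erase _ _ h]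
    simp only [Option.getD_some]
    rw [pvRemoveAll_eq x (l.erase x), pv_filter_erase_self]
  · rw [dif_neg h, (List.filter_eq_self).2]
    intro a ha
    simp only [Bool.not_eq_eq_eq_not, Bool.not_true, beq_eq_false_iff_ne]
    exact fun he => h (he ▸ ha)
termination_by l.length
decreasing_by
  have h1 := List.length_erase_of_mem h
  have h2 : 0 < l.length := List.length_pos_of_mem h
  omega

theorem pvFilterEmpty_eq (l : List String) :
    pvFilterEmpty l = l.filter (fun p => !(p == "" || p == " ")) := by
  unfold pvFilterEmpty
  rw [pvRemoveAll_eq, pvRemoveAll_eq, List.filter_filter]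
  apply List.filter_congr
  intro a _
  cases hb : (a == " ") <;> cases hc : (a == "") <;> simp

-- the branchy dict update of A is exactly one `modify … (· ++ [s])`
theorem pv_step_eq_modify (d : PySem.Dict Int (List (List String))) (n : Int) (s : List String) :
    (if d.contains n then d.modify n [] (· ++ [s]) else d.insert n [s])
      = d.modify n [] (· ++ [s]) := by
  by_cases h : d.contains n = true
  · rw [if_pos h]
  · rw [if_neg h]
    simp only [Bool.not_eq_true] at h
    simp [PySem.Dict.insert, PySem.Dict.modify, h,
      PySem.Dict.getD_of_not_contains (d := d) (k := n) (d0 := ([] : List (List String))) h]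

-- ===== VERDICT (by name: the statement is the Claim_ definition above) =====
theorem content_str_2_list_spec : Claim_equal_content_str_2_list := by
  unfold Claim_equal_content_str_2_list
  intro l _
  unfold Spec_content_str_2_list content_str_2_list content_str_2_list_alt
  dsimp only
  set keys := (PySem.Dict.ofList l).keys with hkeys
  -- rewrite A's loop body into the canonical modify-append step over (length, segments) pairs
  have hbody : (fun (d : PySem.Dict Int (List (List String))) (cl : String) =>
      let cl_list := pvFilterEmpty ((PySem.Str.split? cl ".").getD [])
      let cllen : Int := (cl_list.length : Int)
      if d.contains cllen then d.modify cllen [] (· ++ [cl_list])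
      else d.insert cllen [cl_list])
      = (fun d cl => d.modify (((pvSegments cl).length : Int)) [] (· ++ [pvSegments cl])) := by
    funext d cl
    simp only [pvFilterEmpty_eq, pv_step_eq_modify]
    rfl
  rw [hbody]
  have hfold : keys.foldl
      (fun d cl => d.modify (((pvSegments cl).length : Int)) [] (· ++ [pvSegments cl]))
      PySem.Dict.empty
      = (keys.map (fun cl => (((pvSegments cl).length : Int), pvSegments cl))).foldl
          (fun d p => d.modify p.1 [] (· ++ [p.2])) PySem.Dict.empty := by
    rw [List.foldl_map]
  rw [hfold]
  set pairs := keys.map (fun cl => (((pvSegments cl).length : Int), pvSegments cl)) with hpairs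
  set D := pairs.foldl (fun d p => d.modify p.1 [] (· ++ [p.2])) PySem.Dict.empty with hD
  have hnodup : D.keys.Nodup := by
    rw [hD]
    exact PySem.Dict.nodup_keys_foldl_modify_key pairs Prod.fst [] (fun d p => (· ++ [p.2]))
      PySem.Dict.empty (by simp)
  have hkeysD : D.keys = PySem.List.dedup (pairs.map Prod.fst) := by
    rw [hD]
    rw [PySem.Dict.keys_foldl_modify_key (key := Prod.fst)]
    rfl
  rw [PySem.Dict.items_eq_map_keys D hnodup []]
  rw [hkeysD]
  have hfst : pairs.map Prod.fst = (keys.map pvSegments).map (fun s => (s.length : Int)) := by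
    rw [hpairs]; simp [List.map_map]
  rw [hfst]
  apply List.map_congr_left
  intro n _
  have hget : D.getD n [] = (pairs.filter (fun p => p.1 == n)).map Prod.snd := by
    rw [hD, PySem.Dict.getD_foldl_modify_append]
    simp
  rw [hget, hpairs]
  simp only [List.filter_map, List.map_map]
  rfl
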